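-- pv_equiv track=rewrite | github.com/scarlet2131/DSA-and-competitive-codes | google_foobar/en_route_solution.py | solution
-- ===== SOURCE A (Python) =====
-- def solution(s):
-- 	c = 0
-- 	for i in range(len(s)):
-- 		if s[i]=='<':
-- 			c+=1
-- 	ans = 0
-- 	for i in range(len(s)):
-- 		if s[i]=='<':
-- 			c -=1
-- 		elif s[i]=='-':
-- 			continue
-- 		else:
-- 			ans+=c
-- 	return ans*2
-- ===== SOURCE B (Python) =====
-- def solution(s):
--     # Single pass: each '<' closes a pair with every earlier character
--     # that is neither '<' nor '-' (A credits all such characters).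
--     others = 0
--     ans = 0
--     for ch in s:
--         if ch == '<':
--             ans += others
--         elif ch != '-':
--             others += 1
--     return ans * 2
-- ===== Notes on version B (the rewrite author's own statement) =====
-- stated objective: faster
-- what changed: Replaced A's two passes (precompute total '<' count, then decrement it while accumulating) by a single left-to-right pass that maintains a count of earlier non-'<' non-'-' characters and adds it at each '<' (one pass over the string instead of two).
import Mathlib
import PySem

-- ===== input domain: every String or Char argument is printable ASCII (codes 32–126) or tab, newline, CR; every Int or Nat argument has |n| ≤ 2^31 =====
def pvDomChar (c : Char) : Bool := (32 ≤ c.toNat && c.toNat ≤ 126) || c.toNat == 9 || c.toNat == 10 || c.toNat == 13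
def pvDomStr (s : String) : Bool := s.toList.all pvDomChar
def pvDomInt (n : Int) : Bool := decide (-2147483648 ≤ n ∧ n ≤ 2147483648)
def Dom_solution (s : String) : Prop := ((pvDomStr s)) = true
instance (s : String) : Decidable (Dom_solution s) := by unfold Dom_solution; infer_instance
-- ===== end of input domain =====

-- B: single pass adding the earlier non-'<' non-'-' count at each '<' instead of A's two passes; same O(n) cost, one pass.
-- ===== PORT A =====
-- first loop of A: count '<' characters, accumulating into c
def solutionCount : List Char → Int → Int
  | [], c => c
  | ch :: t, c => if ch = '<' then solutionCount t (c + 1) else solutionCount t c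

-- second loop of A: mutate c down on '<', skip '-', otherwise add c to ans
def solutionLoop : List Char → Int → Int → Int
  | [], _, ans => ans
  | ch :: t, c, ans =>
    if ch = '<' then solutionLoop t (c - 1) ans
    else if ch = '-' then solutionLoop t c ans
    else solutionLoop t c (ans + c)

def solution (s : String) : Int :=
  solutionLoop s.toList (solutionCount s.toList 0) 0 * 2

-- ===== PORT B =====
-- single loop of B: others = earlier chars that are neither '<' nor '-'; '<' adds others to ans
def solutionAltLoop : List Char → Int → Int → Int
  | [], _, ans => ans
  | ch :: t, others, ans =>
    if ch = '<' then solutionAltLoop t others (ans + others)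
    else if ch ≠ '-' then solutionAltLoop t (others + 1) ans
    else solutionAltLoop t others ans

def solution_alt (s : String) : Int :=
  solutionAltLoop s.toList 0 0 * 2

-- ===== PRECONDITION & SPEC =====
def Spec_solution (s : String) (out : Int) : Prop := out = solution_alt s
instance (s : String) (out : Int) : Decidable (Spec_solution s out) := by unfold Spec_solution; infer_instance

-- ===== CLAIM (what is proved, stated in full; the proofs are below) =====
def Claim_equal_solution : Prop := ∀ (s : String), Dom_solution s → Spec_solution s (solution s)

-- ===== LEMMAS AND PROOFS =====

-- ===== VERDICT (by name: the statement is the Claim_ definition above) =====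
theorem count_eq (l : List Char) (c : Int) :
    solutionCount l c = c + (l.count '<' : Int) := by
  induction l generalizing c with
  | nil => simp [solutionCount]
  | cons ch t ih =>
    by_cases h : ch = '<' <;> simp [solutionCount, h, ih, List.count_cons] <;> ring

theorem altLoop_ans (l : List Char) (o a x : Int) :
    solutionAltLoop l o (a + x) = solutionAltLoop l o a + x := by
  induction l generalizing o a with
  | nil => simp [solutionAltLoop]
  | cons ch t ih =>
    by_cases h : ch = '<'
    · simp only [solutionAltLoop, h, if_true, ite_true, eq_self_iff_true]
      rw [show a + x + o = (a + o) + x by ring, ih]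
    · by_cases h2 : ch = '-' <;> simp [solutionAltLoop, h, h2, ih]

theorem altLoop_o (l : List Char) (o a : Int) :
    solutionAltLoop l (o + 1) a = solutionAltLoop l o a + (l.count '<' : Int) := by
  induction l generalizing o a with
  | nil => simp [solutionAltLoop]
  | cons ch t ih =>
    by_cases h : ch = '<'
    · simp only [solutionAltLoop, h, if_true, ite_true, eq_self_iff_true, List.count_cons]
      rw [show a + (o + 1) = (a + o) + 1 by ring, altLoop_ans, ih, altLoop_ans]
      simp; push_cast; ring
    · by_cases h2 : ch = '-' <;>
        simp [solutionAltLoop, h, h2, ih, List.count_cons]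

theorem loop_eq (l : List Char) (a : Int) :
    solutionLoop l (l.count '<' : Int) a = solutionAltLoop l 0 a := by
  induction l generalizing a with
  | nil => simp [solutionLoop, solutionAltLoop]
  | cons ch t ih =>
    by_cases h : ch = '<'
    · simp only [solutionLoop, solutionAltLoop, h, if_true, ite_true, eq_self_iff_true,
        List.count_cons, beq_self_eq_true, add_zero]
      rw [show ((t.count '<' + 1 : Nat) : Int) - 1 = (t.count '<' : Int) by push_cast; ring]
      rw [ih]
    · by_cases h2 : ch = '-'
      · simp [solutionLoop, solutionAltLoop, h, h2, ih, List.count_cons]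
      · have hc : (ch == '<') = false := by simp [h]
        simp only [solutionLoop, solutionAltLoop, h2, if_neg h, List.count_cons, hc,
          ite_false, ne_eq, not_false_eq_true, if_true, cond_false, if_false, add_zero,
          Bool.false_eq_true]
        rw [ih, altLoop_o, altLoop_ans]

theorem solution_spec : Claim_equal_solution := by
  intro s _
  unfold Spec_solution solution solution_alt
  rw [count_eq, zero_add, loop_eq]
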